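-- pv_equiv track=rewrite | github.com/FlyingCheeseDemon/AdventOfCode24 | 5b.py | verify_sequence
-- ===== SOURCE A (Python) =====
-- def verify_sequence(rule_dict,pages):
--     illegal_pages = []
--     for i,page in enumerate(pages):
--         if page in illegal_pages:
--             return False, i
--         if str(page) in rule_dict.keys():
--             illegal_pages += rule_dict[str(page)]
--     return True, 0
-- ===== SOURCE B (Python) =====
-- def verify_sequence(rule_dict, pages):
--     # nested pairwise scan: page i is a violation iff some earlier page j has a
--     # rule forbidding pages[i]; no accumulated illegal_pages list is kept
--     for i in range(len(pages)):
--         for j in range(i):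
--             key = str(pages[j])
--             if key in rule_dict and pages[i] in rule_dict[key]:
--                 return False, i
--     return True, 0
-- ===== Notes on version B (the rewrite author's own statement) =====
-- stated objective: alternative
-- what changed: Replaces the accumulated illegal_pages list with a nested pairwise scan that re-checks every earlier page's rule entry directly, keeping no state across iterations.
import Mathlib
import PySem

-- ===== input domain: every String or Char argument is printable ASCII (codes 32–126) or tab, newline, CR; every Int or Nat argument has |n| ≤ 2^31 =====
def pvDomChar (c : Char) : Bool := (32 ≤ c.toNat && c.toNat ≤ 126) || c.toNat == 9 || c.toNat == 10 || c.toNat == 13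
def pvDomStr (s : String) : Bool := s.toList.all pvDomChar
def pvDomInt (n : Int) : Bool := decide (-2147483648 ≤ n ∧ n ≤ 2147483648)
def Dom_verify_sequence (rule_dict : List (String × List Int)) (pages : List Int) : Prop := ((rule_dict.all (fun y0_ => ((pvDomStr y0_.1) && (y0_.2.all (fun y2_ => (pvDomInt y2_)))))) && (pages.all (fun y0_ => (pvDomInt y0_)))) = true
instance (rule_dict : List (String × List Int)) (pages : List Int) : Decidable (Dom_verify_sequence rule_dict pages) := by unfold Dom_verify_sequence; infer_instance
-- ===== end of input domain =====

-- B replaces A's accumulated illegal_pages list by a stateless nested pairwise scan; same return value.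
-- ===== PORT A =====
-- A: loop over enumerate(pages) with accumulated illegal_pages state
def vsGoA (rule_dict : List (String × List Int)) : List Int → Int → List Int → Bool × Int
  | [], _, _ => (true, 0)
  | page :: rest, i, illegal =>
    if illegal.contains page then (false, i)
    else
      match (PySem.Dict.mk rule_dict).get? (PySem.Int.toStr page) with
      | some v => vsGoA rule_dict rest (i + 1) (illegal ++ v)
      | none => vsGoA rule_dict rest (i + 1) illegal

def verify_sequence (rule_dict : List (String × List Int)) (pages : List Int) : Bool × Int :=
  vsGoA rule_dict pages 0 []

-- ===== PORT B =====
-- B: nested pairwise scan; prev holds the pages before index i, no accumulated rule state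
def vsHit (rule_dict : List (String × List Int)) (q page : Int) : Bool :=
  match (PySem.Dict.mk rule_dict).get? (PySem.Int.toStr q) with
  | some v => v.contains page
  | none => false

def vsGoB (rule_dict : List (String × List Int)) : List Int → Int → List Int → Bool × Int
  | [], _, _ => (true, 0)
  | page :: rest, i, prev =>
    if prev.any (fun q => vsHit rule_dict q page) then (false, i)
    else vsGoB rule_dict rest (i + 1) (prev ++ [page])

def verify_sequence_alt (rule_dict : List (String × List Int)) (pages : List Int) : Bool × Int :=
  vsGoB rule_dict pages 0 []

-- ===== PRECONDITION & SPEC =====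
def Spec_verify_sequence (rule_dict : List (String × List Int)) (pages : List Int) (out : Bool × Int) : Prop := out = verify_sequence_alt rule_dict pages
instance (rule_dict : List (String × List Int)) (pages : List Int) (out : Bool × Int) : Decidable (Spec_verify_sequence rule_dict pages out) := by unfold Spec_verify_sequence; infer_instance

-- ===== CLAIM (what is proved, stated in full; the proofs are below) =====
def Claim_equal_verify_sequence : Prop := ∀ (rule_dict : List (String × List Int)) (pages : List Int), Dom_verify_sequence rule_dict pages → Spec_verify_sequence rule_dict pages (verify_sequence rule_dict pages)

-- ===== LEMMAS AND PROOFS =====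

-- the accumulated illegal list of A equals the flattened rule entries of the previous pages
theorem vsGoA_eq_goB (rule_dict : List (String × List Int)) (rest : List Int) (i : Int)
    (prev : List Int) :
    vsGoA rule_dict rest i (prev.flatMap
      (fun q => ((PySem.Dict.mk rule_dict).get? (PySem.Int.toStr q)).getD [])) =
    vsGoB rule_dict rest i prev := by
  induction rest generalizing i prev with
  | nil => rfl
  | cons page rest ih =>
    have hvs : ∀ q : Int, vsHit rule_dict q page =
        (((PySem.Dict.mk rule_dict).get? (PySem.Int.toStr q)).getD []).contains page := by
      intro q
      unfold vsHit
      cases h : (PySem.Dict.mk rule_dict).get? (PySem.Int.toStr q) <;> simp only [h] <;> simp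
    have hcond : (prev.flatMap
        (fun q => ((PySem.Dict.mk rule_dict).get? (PySem.Int.toStr q)).getD [])).contains page =
        prev.any (fun q => vsHit rule_dict q page) := by
      rw [Bool.eq_iff_iff]
      simp [List.contains_eq_mem, List.mem_flatMap, List.any_eq_true, hvs]
    simp only [vsGoA, vsGoB, hcond]
    by_cases hp : prev.any (fun q => vsHit rule_dict q page) = true
    · simp [hp]
    · simp only [hp, if_neg, Bool.not_eq_true]
      cases h : (PySem.Dict.mk rule_dict).get? (PySem.Int.toStr page) with
      | none => simpa [h, List.flatMap_append] using ih (i + 1) (prev ++ [page])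
      | some v => simpa [h, List.flatMap_append] using ih (i + 1) (prev ++ [page])

-- ===== VERDICT (by name: the statement is the Claim_ definition above) =====
theorem verify_sequence_spec : Claim_equal_verify_sequence := by
  intro rule_dict pages _
  show _ = _
  simpa using vsGoA_eq_goB rule_dict pages 0 []
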